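-- pv_equiv track=rewrite | github.com/Quikks1lver/advent-of-code | 2023/day04.py | part2
-- ===== SOURCE A (Python) =====
-- from typing import List, Tuple, Set
--
-- def part2(input: List[Tuple[Set[int], Set[int]]]) -> int:
--    numCards = [1 for _ in range(len(input))]
--
--    for index, (winningNums, numbersYouHave) in enumerate(input):
--       addedCards = len(winningNums.intersection(numbersYouHave))
--       multiplier = numCards[index]
--
--       for i in range(index + 1, index + addedCards + 1, 1):
--          numCards[i] += multiplier
--
--    return sum(numCards)
-- ===== SOURCE B (Python) =====
-- from typing import List, Tuple, Set
--
-- def part2(input: List[Tuple[Set[int], Set[int]]]) -> int: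
--    n = len(input)
--    total = [0] * n
--    for i in range(n - 1, -1, -1):
--       winningNums, numbersYouHave = input[i]
--       m = len(winningNums.intersection(numbersYouHave))
--       t = 1
--       for j in range(i + 1, i + m + 1):
--          t += total[j]
--       total[i] = t
--    return sum(total)
-- ===== Notes on version B (the rewrite author's own statement) =====
-- stated objective: alternative
-- what changed: Replaces the forward copy-propagation over a numCards array (each card adds its accumulated multiplier to the next m counters) by a backward dynamic program computing total cards spawned per card (total[i] = 1 + sum of total[i+1..i+m]) and summing it.
import Mathlib
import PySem

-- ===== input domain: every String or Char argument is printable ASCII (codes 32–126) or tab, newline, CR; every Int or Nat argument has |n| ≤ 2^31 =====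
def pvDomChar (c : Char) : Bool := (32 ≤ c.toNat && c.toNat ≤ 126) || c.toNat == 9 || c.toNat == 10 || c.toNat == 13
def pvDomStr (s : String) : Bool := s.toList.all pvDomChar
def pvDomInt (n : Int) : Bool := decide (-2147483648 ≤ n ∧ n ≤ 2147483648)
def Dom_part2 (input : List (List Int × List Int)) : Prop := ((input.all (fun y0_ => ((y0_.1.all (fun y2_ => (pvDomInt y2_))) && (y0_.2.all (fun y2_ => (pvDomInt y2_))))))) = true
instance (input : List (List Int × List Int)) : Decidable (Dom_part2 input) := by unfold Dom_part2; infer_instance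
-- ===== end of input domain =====

-- B replaces A's forward copy-propagation (each card adds its accumulated multiplier to the next
-- m counters) by a backward dynamic program: total[i] = 1 + sum of total[i+1..i+m], answer = sum(total).

-- ===== PORT A =====
def part2 (input : List (List Int × List Int)) : Int :=
  let numCards : List Int := (List.range input.length).map (fun _ => (1 : Int))
  let final := (PySem.List.enumerate input 0).foldl (fun nc p =>
    let addedCards : Int := ((PySem.Set.inter p.2.1 p.2.2).length : Int)
    let multiplier : Int := PySem.List.pyGetD nc p.1 0
    (PySem.List.pyRange (p.1 + 1) (p.1 + addedCards + 1) 1).foldl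
      (fun nc2 i => PySem.List.pySetD nc2 i (PySem.List.pyGetD nc2 i 0 + multiplier)) nc) numCards
  final.sum

-- ===== PORT B =====
def part2_alt (input : List (List Int × List Int)) : Int :=
  let n : Int := PySem.List.len input
  let total0 : List Int := List.replicate input.length (0 : Int)
  let total := (PySem.List.pyRange (n - 1) (-1) (-1)).foldl (fun tot i =>
    let p := PySem.List.pyGetD input i ([], [])
    let m : Int := ((PySem.Set.inter p.1 p.2).length : Int)
    let t : Int := (PySem.List.pyRange (i + 1) (i + m + 1) 1).foldl
      (fun t j => t + PySem.List.pyGetD tot j 0) 1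
    PySem.List.pySetD tot i t) total0
  total.sum

-- ===== PRECONDITION & SPEC =====
-- number of matches of one card (size of the set intersection)
def mCount (p : List Int × List Int) : Nat := (PySem.Set.inter p.1 p.2).length

-- Pre_ excludes exactly the inputs where some card's match count reaches past the last card,
-- on which Python A raises IndexError (and B raises IndexError too).
def Pre_part2 (input : List (List Int × List Int)) : Prop :=
  ∀ k, (h : k < input.length) → (mCount input[k] = 0 ∨ k + mCount input[k] < input.length)
instance (input : List (List Int × List Int)) : Decidable (Pre_part2 input) := by
  unfold Pre_part2; infer_instance

def pvWitness_part2 : (List (List Int × List Int)) :=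
  [([1, 2], [2, 3]), ([5], [6]), ([], [7])]

def Spec_part2 (input : List (List Int × List Int)) (out : Int) : Prop := out = part2_alt input
instance (input : List (List Int × List Int)) (out : Int) : Decidable (Spec_part2 input out) := by unfold Spec_part2; infer_instance

-- ===== CLAIM (what is proved, stated in full; the proofs are below) =====
def Claim_equal_part2 : Prop := ∀ (input : List (List Int × List Int)), Dom_part2 input → Pre_part2 input → Spec_part2 input (part2 input)

-- ===== LEMMAS AND PROOFS =====

-- match count of card k (0 when k is out of range)
def mC (input : List (List Int × List Int)) (k : Nat) : Nat := mCount (input.getD k ([], []))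

-- the body of A's outer loop, named for the proofs
def stepA (nc : List Int) (p : Int × (List Int × List Int)) : List Int :=
  let addedCards : Int := ((PySem.Set.inter p.2.1 p.2.2).length : Int)
  let multiplier : Int := PySem.List.pyGetD nc p.1 0
  (PySem.List.pyRange (p.1 + 1) (p.1 + addedCards + 1) 1).foldl
    (fun nc2 i => PySem.List.pySetD nc2 i (PySem.List.pyGetD nc2 i 0 + multiplier)) nc

-- the body of B's outer loop, named for the proofs
def stepB (input : List (List Int × List Int)) (tot : List Int) (i : Int) : List Int :=
  let p := PySem.List.pyGetD input i ([], [])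
  let m : Int := ((PySem.Set.inter p.1 p.2).length : Int)
  let t : Int := (PySem.List.pyRange (i + 1) (i + m + 1) 1).foldl
    (fun t j => t + PySem.List.pyGetD tot j 0) 1
  PySem.List.pySetD tot i t

-- B's finished total array
def altTotal (input : List (List Int × List Int)) : List Int :=
  (PySem.List.pyRange ((PySem.List.len input) - 1) (-1) (-1)).foldl (stepB input)
    (List.replicate input.length (0 : Int))

lemma part2_eq (input : List (List Int × List Int)) :
    part2 input = ((PySem.List.enumerate input 0).foldl stepA
      ((List.range input.length).map (fun _ => (1 : Int)))).sum := rfl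

lemma part2_alt_eq (input : List (List Int × List Int)) :
    part2_alt input = (altTotal input).sum := rfl

lemma sum_map_range (f : Nat → Int) (n : Nat) :
    ((List.range n).map f).sum = ∑ i ∈ Finset.range n, f i := by
  induction n with
  | zero => simp
  | succ n ih => simp [List.range_succ, Finset.sum_range_succ, ih]

-- sum of a list as a sum of its getD values
lemma sum_eq_sum_getD (l : List Int) :
    l.sum = ∑ i ∈ Finset.range l.length, l.getD i 0 := by
  induction l with
  | nil => simp
  | cons x xs ih =>
    simp [Finset.sum_range_succ', ih, add_comm]

-- sum over a unit-step int range of getD values, as a Finset sum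
lemma sum_map_pyRange_getD (tot : List Int) (a b : Nat) :
    ((PySem.List.pyRange (a : Int) (b : Int) 1).map
      (fun j => PySem.List.pyGetD tot j 0)).sum
      = ∑ l ∈ Finset.Ico a b, tot.getD l 0 := by
  rw [PySem.List.pyRange_one, Finset.sum_Ico_eq_sum_range]
  have h : (↑b - ↑a : Int).toNat = b - a := by omega
  rw [h, List.map_map, ← sum_map_range (fun k => tot.getD (a + k) 0) (b - a)]
  congr 1
  apply List.map_congr_left
  intro k _
  simp only [Function.comp]
  have : ((a : Int) + (k : Int)) = ((a + k : Nat) : Int) := by push_cast; ring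
  rw [this, PySem.List.pyGetD_natCast]

-- A's inner loop preserves the length of the counter array
lemma innerA_length (mult : Int) :
    ∀ (ran : List Int) (r : List Int), ((ran.foldl
      (fun nc2 i => PySem.List.pySetD nc2 i (PySem.List.pyGetD nc2 i 0 + mult)) r)).length
      = r.length := by
  intro ran
  induction ran with
  | nil => intro r; rfl
  | cons x xs ih => intro r; simp [List.foldl_cons, ih, PySem.List.length_pySetD]

-- A's inner loop: adds mult to every in-range entry with index in [a, b)
lemma innerA_getD (mult : Int) (b : Int) :
    ∀ (d : Nat) (a : Int), 0 ≤ a → (b - a).toNat = d → ∀ (nc : List Int) (j : Nat),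
    ((PySem.List.pyRange a b 1).foldl
      (fun nc2 i => PySem.List.pySetD nc2 i (PySem.List.pyGetD nc2 i 0 + mult)) nc).getD j 0
      = if a ≤ (j : Int) ∧ (j : Int) < b ∧ j < nc.length
        then nc.getD j 0 + mult else nc.getD j 0 := by
  intro d
  induction d with
  | zero =>
    intro a ha hd nc j
    rw [PySem.List.pyRange_one_eq_nil (by omega)]
    simp only [List.foldl_nil]
    rw [if_neg (by omega)]
  | succ d ih =>
    intro a ha hd nc j
    rw [PySem.List.pyRange_one_cons (by omega), List.foldl_cons]
    have hset : PySem.List.pySetD nc a (PySem.List.pyGetD nc a 0 + mult)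
        = nc.set a.toNat (PySem.List.pyGetD nc a 0 + mult) :=
      PySem.List.pySetD_of_nonneg _ _ ha
    rw [ih (a + 1) (by omega) (by omega)]
    rw [hset]
    simp only [List.length_set]
    have hga : PySem.List.pyGetD nc a 0 = nc.getD a.toNat 0 := by
      conv_lhs => rw [show a = ((a.toNat : Nat) : Int) by omega]
      rw [PySem.List.pyGetD_natCast]
    have hgset : ∀ (k : Nat), (nc.set a.toNat (PySem.List.pyGetD nc a 0 + mult)).getD k 0
        = if k = a.toNat ∧ k < nc.length then nc.getD k 0 + mult else nc.getD k 0 := by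
      intro k
      simp only [List.getD_eq_getElem?_getD, List.getElem?_set]
      split_ifs with h1 h2 h3 h4 <;> try (first | rfl | omega)
      all_goals (try simp [hga, h1])
      rw [List.getElem?_eq_none (by omega)]; rfl
    by_cases hcase : (j : Int) = a
    · rw [if_neg (by omega), hgset]
      split_ifs with h1 h2 h2 <;> first | rfl | omega
    · rw [hgset]
      by_cases hj1 : (a + 1 ≤ (j : Int) ∧ (j : Int) < b ∧ j < nc.length)
      · rw [if_pos hj1, if_neg (by omega), if_pos (by omega)]
      · rw [if_neg hj1, if_neg (by omega), if_neg (by omega)]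

-- one step of B's countdown writes total[d] = 1 + sum of total[d+1 .. d+m]
lemma stepB_eq (input : List (List Int × List Int)) (tot : List Int) (d : Nat) :
    stepB input tot (d : Int)
      = tot.set d (1 + ∑ l ∈ Finset.Ico (d + 1) (d + mC input d + 1), tot.getD l 0) := by
  unfold stepB
  simp only [PySem.List.pyGetD_natCast]
  rw [PySem.List.foldl_add]
  have hm : ((PySem.Set.inter (input.getD d ([], [])).1 (input.getD d ([], [])).2).length : Int)
      = (mC input d : Int) := by simp [mC, mCount]
  rw [hm]
  have h1 : ((d : Int) + 1) = ((d + 1 : Nat) : Int) := by push_cast; ring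
  have h2 : ((d : Int) + (mC input d : Int) + 1) = ((d + mC input d + 1 : Nat) : Int) := by
    push_cast; ring
  rw [h1, h2, sum_map_pyRange_getD tot (d + 1) (d + mC input d + 1)]
  simp

-- B's countdown loop with fuel d: indices d-1, …, 0 processed; entries ≥ d untouched,
-- entries < d carry the backward recurrence
lemma bFold_spec (input : List (List Int × List Int)) :
    ∀ (d : Nat), d ≤ input.length → ∀ (tot : List Int), tot.length = input.length →
    (((PySem.List.pyRange ((d : Int) - 1) (-1) (-1)).foldl (stepB input) tot).length = input.length)
    ∧ (∀ j : Nat, d ≤ j →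
        ((PySem.List.pyRange ((d : Int) - 1) (-1) (-1)).foldl (stepB input) tot).getD j 0
          = tot.getD j 0)
    ∧ (∀ j : Nat, j < d →
        ((PySem.List.pyRange ((d : Int) - 1) (-1) (-1)).foldl (stepB input) tot).getD j 0
          = 1 + ∑ l ∈ Finset.Ico (j + 1) (j + mC input j + 1),
              ((PySem.List.pyRange ((d : Int) - 1) (-1) (-1)).foldl (stepB input) tot).getD l 0) := by
  intro d
  induction d with
  | zero =>
    intro _ tot htot
    rw [PySem.List.pyRange_neg_one_eq_nil (by omega)]
    exact ⟨htot, fun j _ => rfl, fun j hj => absurd hj (by omega)⟩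
  | succ d ih =>
    intro hd tot htot
    have e1 : ((d + 1 : Nat) : Int) - 1 = ((d : Nat) : Int) := by push_cast; ring
    rw [e1, PySem.List.pyRange_neg_one_cons (by omega), List.foldl_cons, stepB_eq input tot d]
    set t := 1 + ∑ l ∈ Finset.Ico (d + 1) (d + mC input d + 1), tot.getD l 0 with ht
    set tot' := tot.set d t with htot'def
    have htot' : tot'.length = input.length := by simp [htot'def, htot]
    obtain ⟨L, Hi, Lo⟩ := ih (by omega) tot' htot'
    have hne : ∀ j : Nat, j ≠ d → tot'.getD j 0 = tot.getD j 0 := by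
      intro j hj
      simp [htot'def, List.getD_eq_getElem?_getD, Ne.symm hj]
    refine ⟨L, ?_, ?_⟩
    · intro j hj
      rw [Hi j (by omega), hne j (by omega)]
    · intro j hj
      by_cases hjd : j < d
      · exact Lo j hjd
      · have hjd' : j = d := by omega
        subst hjd'
        rw [Hi j le_rfl]
        have hself : tot'.getD j 0 = t := by
          rw [htot'def, List.getD_eq_getElem?_getD, List.getElem?_set_self]
          · rfl
          · omega
        rw [hself, ht]
        congr 1
        apply Finset.sum_congr rfl
        intro l hl
        rw [Finset.mem_Ico] at hl
        rw [Hi l (by omega), hne l (by omega)]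

lemma altTotal_length (input : List (List Int × List Int)) :
    (altTotal input).length = input.length := by
  have h := (bFold_spec input input.length le_rfl (List.replicate input.length 0) (by simp)).1
  simpa [altTotal, PySem.List.len_eq] using h

lemma altTotal_getD (input : List (List Int × List Int)) (k : Nat) (hk : k < input.length) :
    (altTotal input).getD k 0
      = 1 + ∑ l ∈ Finset.Ico (k + 1) (k + mC input k + 1), (altTotal input).getD l 0 := by
  have h := (bFold_spec input input.length le_rfl
    (List.replicate input.length 0) (by simp)).2.2 k hk
  simpa [altTotal, PySem.List.len_eq] using h

-- A's outer loop: the running card counts, summed, weighted by B's per-card totals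
lemma aFold_sum (input : List (List Int × List Int)) (hPre : Pre_part2 input) :
    ∀ (d : Nat) (k : Nat), k ≤ input.length → input.length - k = d →
    ∀ (nc : List Int), nc.length = input.length →
    ((PySem.List.enumerate (input.drop k) (k : Int)).foldl stepA nc).sum
      = (∑ i ∈ Finset.range k, nc.getD i 0)
        + ∑ i ∈ Finset.Ico k input.length, nc.getD i 0 * (altTotal input).getD i 0 := by
  intro d
  induction d with
  | zero =>
    intro k hk hd nc hnc
    have hkn : k = input.length := by omega
    subst hkn
    rw [List.drop_of_length_le le_rfl]
    simp [PySem.List.enumerate, sum_eq_sum_getD, hnc]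
  | succ d ih =>
    intro k hk hd nc hnc
    have hklt : k < input.length := by omega
    have hdrop : input.drop k = input[k] :: input.drop (k + 1) :=
      List.drop_eq_getElem_cons hklt
    rw [hdrop, PySem.List.enumerate_cons, List.foldl_cons]
    have hm : mC input k = mCount input[k] := by
      simp [mC, List.getD_eq_getElem?_getD, List.getElem?_eq_getElem hklt]
    set m := mC input k with hmdef
    have hu : k + m + 1 ≤ input.length := by
      rcases hPre k hklt with h | h <;> omega
    -- unfold stepA at the head element
    have hstep : stepA nc ((k : Int), input[k])
        = (PySem.List.pyRange ((k : Int) + 1) ((k : Int) + (m : Int) + 1) 1).foldl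
            (fun nc2 i => PySem.List.pySetD nc2 i (PySem.List.pyGetD nc2 i 0 + nc.getD k 0)) nc := by
      unfold stepA
      simp only [PySem.List.pyGetD_natCast]
      rw [hm, mCount]
    have hnc'len : (stepA nc ((k : Int), input[k])).length = input.length := by
      rw [hstep, innerA_length]; exact hnc
    have hgd : ∀ j : Nat, (stepA nc ((k : Int), input[k])).getD j 0
        = if k + 1 ≤ j ∧ j < k + m + 1 then nc.getD j 0 + nc.getD k 0 else nc.getD j 0 := by
      intro j
      rw [hstep, innerA_getD (nc.getD k 0) _ m ((k : Int) + 1) (by omega)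
        (by omega) nc j]
      by_cases h : k + 1 ≤ j ∧ j < k + m + 1
      · have hc : ((k : Int) + 1 ≤ (j : Int) ∧ (j : Int) < (k : Int) + (m : Int) + 1
            ∧ j < nc.length) := by refine ⟨?_, ?_, ?_⟩ <;> omega
        rw [if_pos hc, if_pos h]
      · have hc : ¬((k : Int) + 1 ≤ (j : Int) ∧ (j : Int) < (k : Int) + (m : Int) + 1
            ∧ j < nc.length) := by omega
        rw [if_neg hc, if_neg h]
    rw [show (k : Int) + 1 = ((k + 1 : Nat) : Int) by push_cast; ring]
    rw [ih (k + 1) (by omega) (by omega) _ hnc'len]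
    have e1 : ∑ i ∈ Finset.range (k + 1), (stepA nc ((k : Int), input[k])).getD i 0
        = (∑ i ∈ Finset.range k, nc.getD i 0) + nc.getD k 0 := by
      rw [Finset.sum_range_succ]
      congr 1
      · apply Finset.sum_congr rfl
        intro i hi
        rw [Finset.mem_range] at hi
        rw [hgd i, if_neg (by omega)]
      · rw [hgd k, if_neg (by omega)]
    have hsplitL := (Finset.sum_Ico_consecutive
      (f := fun i => (stepA nc ((k : Int), input[k])).getD i 0 * (altTotal input).getD i 0)
      (show k + 1 ≤ k + m + 1 by omega) hu).symm
    have hsplitR := (Finset.sum_Ico_consecutive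
      (f := fun i => nc.getD i 0 * (altTotal input).getD i 0)
      (show k + 1 ≤ k + m + 1 by omega) hu).symm
    have e2a : ∑ i ∈ Finset.Ico (k + 1) (k + m + 1),
        (stepA nc ((k : Int), input[k])).getD i 0 * (altTotal input).getD i 0
        = (∑ i ∈ Finset.Ico (k + 1) (k + m + 1), nc.getD i 0 * (altTotal input).getD i 0)
          + nc.getD k 0 * ∑ i ∈ Finset.Ico (k + 1) (k + m + 1), (altTotal input).getD i 0 := by
      rw [Finset.mul_sum, ← Finset.sum_add_distrib]
      apply Finset.sum_congr rfl
      intro i hi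
      rw [Finset.mem_Ico] at hi
      rw [hgd i, if_pos (by omega)]
      ring
    have e2b : ∑ i ∈ Finset.Ico (k + m + 1) input.length,
        (stepA nc ((k : Int), input[k])).getD i 0 * (altTotal input).getD i 0
        = ∑ i ∈ Finset.Ico (k + m + 1) input.length, nc.getD i 0 * (altTotal input).getD i 0 := by
      apply Finset.sum_congr rfl
      intro i hi
      rw [Finset.mem_Ico] at hi
      rw [hgd i, if_neg (by omega)]
    have e3 := altTotal_getD input k hklt
    rw [← hmdef] at e3
    rw [e1, hsplitL, e2a, e2b, Finset.sum_eq_sum_Ico_succ_bot hklt, hsplitR]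
    linear_combination (-(nc.getD k 0)) * e3

-- ===== VERDICT (by name: the statement is the Claim_ definition above) =====
theorem part2_spec : Claim_equal_part2 := by
  intro input _hDom hPre
  show part2 input = part2_alt input
  rw [part2_eq, part2_alt_eq]
  have h0 : (List.range input.length).map (fun _ => (1 : Int))
      = List.replicate input.length (1 : Int) := by
    simp [List.map_const']
  have h := aFold_sum input hPre input.length 0 (by omega) (by omega)
    (List.replicate input.length (1 : Int)) (by simp)
  rw [List.drop_zero, Nat.cast_zero] at h
  rw [h0, h]
  rw [sum_eq_sum_getD (altTotal input), altTotal_length]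
  rw [Finset.range_eq_Ico]
  simp only [Finset.Ico_self, Finset.sum_empty, zero_add]
  apply Finset.sum_congr rfl
  intro i hi
  rw [Finset.mem_Ico] at hi
  rw [List.getD_eq_getElem?_getD, List.getElem?_replicate, if_pos hi.2]
  simp
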